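-- pv_equiv track=rewrite | github.com/Kanefav/python | fatorial.py | dividir_fatorial
-- ===== SOURCE A (Python) =====
-- def fatorial(num, division=False):
--     numbers = []
--     for num in range(num, 0, -1):
--         numbers.append(num)
--     if division==True:
--         return numbers
--     else:
--         return multiplicador_lista(numbers)
--
-- def multiplicador_lista(list):
--     output = 1
--     for num in list:
--         output *= num
--     return output
--
-- def dividir_fatorial(Fa, Fb):
--     x = 0
--     numbers = []
--     Fa = fatorial(Fa, True)
--     Fb = fatorial(Fb, True)
--     for diferente in range(len(Fb), len(Fa)):
--         numbers.append(Fa[x])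
--         x += 1
--     return multiplicador_lista(numbers)
-- ===== SOURCE B (Python) =====
-- def _fact(n):
--     out = 1
--     for k in range(2, n + 1):
--         out *= k
--     return out
--
-- def dividir_fatorial(Fa, Fb):
--     if Fa <= Fb:
--         return 1
--     return _fact(Fa) // _fact(Fb)
-- ===== Notes on version B (the rewrite author's own statement) =====
-- stated objective: simpler
-- what changed: B returns fact(Fa) // fact(Fb) (exact quotient of two whole factorials, 1 when Fa <= Fb) instead of A's materialising the descending list [Fa..1], taking a prefix of length len difference and multiplying it.
import Mathlib
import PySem

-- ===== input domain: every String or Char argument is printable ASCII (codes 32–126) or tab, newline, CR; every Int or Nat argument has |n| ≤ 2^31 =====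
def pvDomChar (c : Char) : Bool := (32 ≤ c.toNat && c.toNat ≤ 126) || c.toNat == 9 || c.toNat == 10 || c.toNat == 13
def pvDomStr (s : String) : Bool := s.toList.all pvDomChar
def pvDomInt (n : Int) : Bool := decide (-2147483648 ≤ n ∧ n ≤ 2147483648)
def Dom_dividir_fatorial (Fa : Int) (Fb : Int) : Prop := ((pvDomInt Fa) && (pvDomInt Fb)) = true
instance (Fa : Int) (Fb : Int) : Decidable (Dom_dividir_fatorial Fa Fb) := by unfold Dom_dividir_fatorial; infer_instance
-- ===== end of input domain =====

-- B returns fact(Fa) // fact(Fb) (1 when Fa <= Fb) instead of A's prefix-of-a-descending-list product: simpler; not claimed faster.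

-- ===== PORT A =====
-- fatorial(num, True): builds [num, num-1, ..., 1] by appending and returns the list (the only way A calls it)
def fatorialLista (num : Int) : List Int :=
  (PySem.List.pyRange num 0 (-1)).foldl (fun acc n => acc ++ [n]) []

def multiplicador_lista (l : List Int) : Int :=
  l.foldl (fun output num => output * num) 1

def dividir_fatorial (Fa : Int) (Fb : Int) : Int :=
  let FaL := fatorialLista Fa
  let FbL := fatorialLista Fb
  -- for diferente in range(len(Fb), len(Fa)): numbers.append(Fa[x]); x += 1
  -- (the index x stays in range, so Fa[x] is PySem.List.pyGetD with an unreachable default)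
  let st := (PySem.List.pyRange (FbL.length : Int) (FaL.length : Int) 1).foldl
    (fun (st : Int × List Int) _ => (st.1 + 1, st.2 ++ [PySem.List.pyGetD FaL st.1 0])) (0, [])
  multiplicador_lista st.2

-- ===== PORT B =====
def pvFact (n : Int) : Int :=
  (PySem.List.pyRange 2 (n + 1) 1).foldl (fun out k => out * k) 1

def dividir_fatorial_alt (Fa : Int) (Fb : Int) : Int :=
  if Fa ≤ Fb then 1 else PySem.Int.floordiv (pvFact Fa) (pvFact Fb)

-- ===== PRECONDITION & SPEC =====
def Spec_dividir_fatorial (Fa : Int) (Fb : Int) (out : Int) : Prop := out = dividir_fatorial_alt Fa Fb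
instance (Fa : Int) (Fb : Int) (out : Int) : Decidable (Spec_dividir_fatorial Fa Fb out) := by unfold Spec_dividir_fatorial; infer_instance

-- ===== CLAIM (what is proved, stated in full; the proofs are below) =====
def Claim_equal_dividir_fatorial : Prop := ∀ (Fa : Int) (Fb : Int), Dom_dividir_fatorial Fa Fb → Spec_dividir_fatorial Fa Fb (dividir_fatorial Fa Fb)

-- ===== LEMMAS AND PROOFS =====

-- B's factorial loop computes the factorial of n.toNat
lemma prod_two_add (m : Nat) :
    (List.foldl (fun out k => out * k) 1 ((List.range m).map (fun (k : Nat) => 2 + (k : Int)))) =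
      ((m + 1).factorial : Int) := by
  induction m with
  | zero => simp [Nat.factorial]
  | succ m ih =>
    rw [List.range_succ, List.map_append, List.foldl_append, ih]
    simp only [List.map_cons, List.map_nil, List.foldl_cons, List.foldl_nil, Nat.factorial_succ]
    push_cast
    ring

lemma pvFact_eq (n : Int) : pvFact n = (n.toNat.factorial : Int) := by
  unfold pvFact
  rw [PySem.List.pyRange_one]
  have h1 : (n + 1 - 2 : Int) = n - 1 := by ring
  rw [h1]
  have h2 : (List.map (fun k => (2 : Int) + (k : Nat)) (List.range (n - 1).toNat)) =
      (List.range (n - 1).toNat).map (fun (k : Nat) => 2 + (k : Int)) := rfl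
  rw [h2, prod_two_add (n - 1).toNat]
  by_cases hn : 1 ≤ n
  · have : (n - 1).toNat + 1 = n.toNat := by omega
    rw [this]
  · have h0 : (n - 1).toNat = 0 := by omega
    have h0' : n.toNat = 0 := by omega
    simp [h0, h0', Nat.factorial]

-- A's indexed append loop collects consecutive elements of L starting at index x
lemma loop_collect (L : List Int) (r : List Int) : ∀ (x : Int) (acc : List Int),
    (r.foldl (fun (st : Int × List Int) _ =>
        (st.1 + 1, st.2 ++ [PySem.List.pyGetD L st.1 0])) (x, acc)) =
      (x + r.length, acc ++ (List.range r.length).map (fun (i : Nat) => PySem.List.pyGetD L (x + i) 0)) := by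
  induction r with
  | nil => intro x acc; simp
  | cons a r ih =>
    intro x acc
    rw [List.foldl_cons, ih, List.length_cons, Prod.mk.injEq]
    constructor
    · push_cast; ring
    · rw [List.range_succ_eq_map, List.map_cons, List.map_map,
        List.append_assoc, List.cons_append, List.nil_append]
      have hhd : PySem.List.pyGetD L (x + (0 : Nat)) 0 = PySem.List.pyGetD L x 0 := by
        norm_num
      rw [hhd]
      have htl : (List.range r.length).map ((fun (i : Nat) => PySem.List.pyGetD L (x + i) 0) ∘ Nat.succ) =
          (List.range r.length).map (fun (i : Nat) => PySem.List.pyGetD L (x + 1 + i) 0) := by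
        refine List.map_congr_left ?_
        intro i _
        simp only [Function.comp_apply]
        congr 1
        push_cast
        ring
      rw [htl]

-- the product of the m leading terms Fa, Fa-1, … is a descending factorial
lemma prod_desc (A : Int) : ∀ (m : Nat), m ≤ A.toNat →
    (List.foldl (fun output num => output * num) 1
        ((List.range m).map (fun (i : Nat) => A - (i : Int)))) =
      ((A.toNat.descFactorial m : Nat) : Int) := by
  intro m
  induction m with
  | zero => intro _; simp
  | succ m ih =>
    intro h
    rw [List.range_succ, List.map_append, List.foldl_append, ih (by omega)]
    simp only [List.map_cons, List.map_nil, List.foldl_cons, List.foldl_nil,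
      Nat.descFactorial_succ]
    have hc : ((A.toNat - m : Nat) : Int) = A - m := by omega
    push_cast [← hc]
    ring

theorem dividir_fatorial_eq (Fa Fb : Int) :
    dividir_fatorial Fa Fb = dividir_fatorial_alt Fa Fb := by
  have hLa : fatorialLista Fa = (List.range Fa.toNat).map (fun (k : Nat) => Fa - (k : Int)) := by
    unfold fatorialLista
    rw [PySem.List.foldl_append_singleton_eq_self, PySem.List.pyRange_neg_one]
    rw [List.nil_append, sub_zero]
  have hLb : fatorialLista Fb = (List.range Fb.toNat).map (fun (k : Nat) => Fb - (k : Int)) := by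
    unfold fatorialLista
    rw [PySem.List.foldl_append_singleton_eq_self, PySem.List.pyRange_neg_one]
    rw [List.nil_append, sub_zero]
  simp only [dividir_fatorial]
  rw [loop_collect]
  simp only [hLa, hLb, List.length_map, List.length_range,
    PySem.List.length_pyRange_one]
  have hm : ((Fa.toNat : Int) - (Fb.toNat : Int)).toNat = Fa.toNat - Fb.toNat := by omega
  rw [hm]
  -- rewrite each collected element as Fa - i
  have hidx : (List.range (Fa.toNat - Fb.toNat)).map
      (fun (i : Nat) => PySem.List.pyGetD ((List.range Fa.toNat).map (fun (k : Nat) => Fa - (k : Int))) (0 + (i : Int)) 0) =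
      (List.range (Fa.toNat - Fb.toNat)).map (fun (i : Nat) => Fa - (i : Int)) := by
    apply List.map_congr_left
    intro i hi
    rw [List.mem_range] at hi
    rw [zero_add, PySem.List.pyGetD_natCast,
      PySem.List.getD_map_range _ _ _ _ (by omega)]
  rw [hidx]
  unfold multiplicador_lista
  unfold dividir_fatorial_alt
  by_cases hab : Fa ≤ Fb
  · have : Fa.toNat - Fb.toNat = 0 := by omega
    simp [this, hab]
  · rw [if_neg hab]
    have hba : Fb.toNat ≤ Fa.toNat := by omega
    rw [List.nil_append, prod_desc Fa (Fa.toNat - Fb.toNat) (by omega)]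
    rw [pvFact_eq Fa, pvFact_eq Fb, PySem.Int.floordiv_natCast]
    rw [Nat.descFactorial_eq_div (by omega : Fa.toNat - Fb.toNat ≤ Fa.toNat)]
    have hsub : Fa.toNat - (Fa.toNat - Fb.toNat) = Fb.toNat := by omega
    rw [hsub]

-- ===== VERDICT (by name: the statement is the Claim_ definition above) =====
theorem dividir_fatorial_spec : Claim_equal_dividir_fatorial := by
  intro Fa Fb _
  exact dividir_fatorial_eq Fa Fb
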